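-- pv_equiv track=rewrite | github.com/cpt-r3tr0/hakerrank-mathematics | Fundamentals/RussianPeasantExponentiation.py | solve
-- ===== SOURCE A (Python) =====
-- def solve(a, b, k, m):
--     x, y = a, b
--     ansx, ansy = 1, 0
--     while k>0:
--         if k&1:
--             ansx, ansy = (ansx*x - y*ansy)%m, (ansx*y + x*ansy)%m
--         x, y = (x*x - y*y)%m, (2*x*y)%m
--         k >>= 1
--     return (ansx, ansy)
-- ===== SOURCE B (Python) =====
-- def solve(a, b, k, m):
--     # Recursive exponentiation by squaring on Gaussian integers mod m:
--     # compute the half power once, square it, multiply by the base if k is odd.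
--     if k <= 0:
--         return (1, 0)
--     px, py = solve(a, b, k >> 1, m)
--     ex, ey = (px * px - py * py) % m, (2 * px * py) % m
--     if k & 1:
--         ex, ey = (ex * a - b * ey) % m, (ex * b + a * ey) % m
--     return (ex, ey)
-- ===== Notes on version B (the rewrite author's own statement) =====
-- stated objective: alternative
-- what changed: Replaced the LSB-first iterative accumulator loop (which squares the base at every bit and conditionally multiplies it into an accumulator) by a tree-shaped halving recursion that computes the half power once, squares it mod m, and multiplies in the base when k is odd.
import Mathlib
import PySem

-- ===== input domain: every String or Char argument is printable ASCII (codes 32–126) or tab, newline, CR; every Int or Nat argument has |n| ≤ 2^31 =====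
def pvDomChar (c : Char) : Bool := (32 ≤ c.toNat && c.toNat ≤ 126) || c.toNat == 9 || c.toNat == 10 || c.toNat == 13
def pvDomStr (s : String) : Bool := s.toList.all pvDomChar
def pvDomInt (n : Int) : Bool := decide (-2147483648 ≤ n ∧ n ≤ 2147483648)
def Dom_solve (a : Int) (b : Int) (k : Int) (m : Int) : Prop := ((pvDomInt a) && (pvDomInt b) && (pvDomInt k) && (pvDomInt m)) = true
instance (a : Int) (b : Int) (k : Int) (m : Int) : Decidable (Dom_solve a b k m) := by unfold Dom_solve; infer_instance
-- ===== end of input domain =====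

-- B replaces A's LSB-first accumulator loop with a halving (square-the-half-power) recursion; alternative decomposition, same cost.


-- `n >> 1` on a nonnegative Python int is halving (used by both ports' termination proofs)
theorem pvNatCast_shiftRight_one (n : Nat) : ((n : Int) >>> (1 : Nat)) = ((n / 2 : Nat) : Int) := by
  rw [Int.shiftRight_eq]
  show Int.ofNat (n >>> 1) = _
  rw [Nat.shiftRight_one]
  rfl

theorem pvShiftRight_one_toNat_lt (k : Int) (h : 0 < k) : (k >>> (1 : Nat)).toNat < k.toNat := by
  obtain ⟨n, rfl⟩ : ∃ n : Nat, k = (n : Int) := ⟨k.toNat, (Int.toNat_of_nonneg h.le).symm⟩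
  rw [pvNatCast_shiftRight_one]
  omega

-- ===== PORT A =====
-- the while-loop of A: state (x, y, ansx, ansy, k); `k & 1` = PySem.Int.band, `k >>= 1` = `>>> 1`
def solveLoop (m x y ansx ansy k : Int) : Int × Int :=
  if h : 0 < k then
    solveLoop m (PySem.Int.mod (x * x - y * y) m) (PySem.Int.mod (2 * x * y) m)
      (if PySem.Int.band k 1 ≠ 0 then PySem.Int.mod (ansx * x - y * ansy) m else ansx)
      (if PySem.Int.band k 1 ≠ 0 then PySem.Int.mod (ansx * y + x * ansy) m else ansy)
      (k >>> (1 : Nat))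
  else (ansx, ansy)
termination_by k.toNat
decreasing_by exact pvShiftRight_one_toNat_lt k h

def solve (a : Int) (b : Int) (k : Int) (m : Int) : Int × Int := solveLoop m a b 1 0 k

-- ===== PORT B =====
def solve_alt (a : Int) (b : Int) (k : Int) (m : Int) : Int × Int :=
  if h : k ≤ 0 then (1, 0)
  else
    let p := solve_alt a b (k >>> (1 : Nat)) m
    let ex := PySem.Int.mod (p.1 * p.1 - p.2 * p.2) m
    let ey := PySem.Int.mod (2 * p.1 * p.2) m
    if PySem.Int.band k 1 ≠ 0 then
      (PySem.Int.mod (ex * a - b * ey) m, PySem.Int.mod (ex * b + a * ey) m)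
    else (ex, ey)
termination_by k.toNat
decreasing_by exact pvShiftRight_one_toNat_lt k (by omega)

-- ===== PRECONDITION & SPEC =====
-- Pre_ excludes exactly m = 0 with k > 0, where Python's `%` raises ZeroDivisionError in both A and B.
def Pre_solve (a : Int) (b : Int) (k : Int) (m : Int) : Prop := k ≤ 0 ∨ m ≠ 0
instance (a : Int) (b : Int) (k : Int) (m : Int) : Decidable (Pre_solve a b k m) := by unfold Pre_solve; infer_instance

def pvWitness_solve : Int × Int × Int × Int := (1, 2, 3, 5)

def Spec_solve (a : Int) (b : Int) (k : Int) (m : Int) (out : Int × Int) : Prop := out = solve_alt a b k m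
instance (a : Int) (b : Int) (k : Int) (m : Int) (out : Int × Int) : Decidable (Spec_solve a b k m out) := by unfold Spec_solve; infer_instance

-- ===== CLAIM (what is proved, stated in full; the proofs are below) =====
def Claim_equal_solve : Prop := ∀ (a : Int) (b : Int) (k : Int) (m : Int), Dom_solve a b k m → Pre_solve a b k m → Spec_solve a b k m (solve a b k m)

-- ===== LEMMAS AND PROOFS =====

-- Gaussian-integer view of the pair arithmetic
def Gz (x y : Int) : GaussianInt := ⟨x, y⟩
def gmod (m : Int) (z : GaussianInt) : Int × Int := (PySem.Int.mod z.re m, PySem.Int.mod z.im m)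
def GCong (m : Int) (z w : GaussianInt) : Prop := z.re ≡ w.re [ZMOD m] ∧ z.im ≡ w.im [ZMOD m]

theorem pv_modeq_fmod_self (m a : Int) : PySem.Int.mod a m ≡ a [ZMOD m] := by
  rw [Int.modEq_iff_dvd]
  refine ⟨PySem.Int.floordiv a m, ?_⟩
  have h := PySem.Int.floordiv_mul_add_mod a m
  linarith

theorem pv_fmod_congr {m a b : Int} (h : a ≡ b [ZMOD m]) : PySem.Int.mod a m = PySem.Int.mod b m := by
  rcases eq_or_ne m 0 with rfl | hm
  · have : a = b := by simpa [Int.ModEq] using h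
    rw [this]
  · have h1 : PySem.Int.mod a m ≡ PySem.Int.mod b m [ZMOD m] :=
      ((pv_modeq_fmod_self m a).trans h).trans (pv_modeq_fmod_self m b).symm
    have hd : m ∣ PySem.Int.mod b m - PySem.Int.mod a m := Int.ModEq.dvd h1
    have habs : |m| ∣ PySem.Int.mod b m - PySem.Int.mod a m := (abs_dvd _ _).mpr hd
    have hz : PySem.Int.mod b m - PySem.Int.mod a m = 0 := by
      refine Int.eq_zero_of_abs_lt_dvd habs ?_
      rcases lt_or_gt_of_ne hm with hneg | hpos
      · have b1 := PySem.Int.mod_neg_bounds a hneg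
        have b2 := PySem.Int.mod_neg_bounds b hneg
        rw [abs_of_neg hneg]; rw [abs_lt]; omega
      · have b1 := PySem.Int.mod_nonneg a hpos
        have b2 := PySem.Int.mod_lt a hpos
        have b3 := PySem.Int.mod_nonneg b hpos
        have b4 := PySem.Int.mod_lt b hpos
        rw [abs_of_pos hpos]; rw [abs_lt]; omega
    omega

theorem GCong.rfl {m : Int} (z : GaussianInt) : GCong m z z := ⟨Int.ModEq.refl _, Int.ModEq.refl _⟩

theorem GCong.mul {m : Int} {z z' w w' : GaussianInt} (h1 : GCong m z z') (h2 : GCong m w w') :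
    GCong m (z * w) (z' * w') := by
  obtain ⟨h1r, h1i⟩ := h1
  obtain ⟨h2r, h2i⟩ := h2
  constructor
  · show z.re * w.re + -1 * z.im * w.im ≡ z'.re * w'.re + -1 * z'.im * w'.im [ZMOD m]
    exact (h1r.mul h2r).add (((Int.ModEq.refl (-1)).mul h1i).mul h2i)
  · show z.re * w.im + z.im * w.re ≡ z'.re * w'.im + z'.im * w'.re [ZMOD m]
    exact (h1r.mul h2i).add (h1i.mul h2r)

theorem GCong.pow {m : Int} {z w : GaussianInt} (h : GCong m z w) (n : Nat) :
    GCong m (z ^ n) (w ^ n) := by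
  induction n with
  | zero => simpa using GCong.rfl 1
  | succ n ih => rw [pow_succ, pow_succ]; exact ih.mul h

theorem gmod_congr {m : Int} {z w : GaussianInt} (h : GCong m z w) : gmod m z = gmod m w := by
  obtain ⟨hr, hi⟩ := h
  simp [gmod, pv_fmod_congr hr, pv_fmod_congr hi]

theorem gmod_cong_self (m u v : Int) : GCong m (Gz (PySem.Int.mod u m) (PySem.Int.mod v m)) (Gz u v) :=
  ⟨pv_modeq_fmod_self m u, pv_modeq_fmod_self m v⟩

theorem pv_band_ne_iff (n : Nat) : (PySem.Int.band (n : Int) 1 ≠ 0) ↔ n % 2 = 1 := by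
  rw [PySem.Int.band_one]
  rw [PySem.Int.mod_eq_emod_of_pos (by norm_num)]
  omega

theorem Gz_mul_re (x y u v : Int) : (Gz x y * Gz u v).re = x * u + -1 * y * v := rfl
theorem Gz_mul_im (x y u v : Int) : (Gz x y * Gz u v).im = x * v + y * u := rfl

-- characterisation of A's loop: it computes (ans * base^k) reduced componentwise mod m
theorem loopA_char (m : Int) : ∀ n : Nat, 0 < n → ∀ x y ansx ansy : Int,
    solveLoop m x y ansx ansy (n : Int) = gmod m (Gz ansx ansy * (Gz x y) ^ n) := by
  intro n
  induction n using Nat.strong_induction_on with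
  | _ n ih =>
  intro hn x y ansx ansy
  rw [solveLoop]
  rw [dif_pos (by exact_mod_cast hn)]
  rw [pvNatCast_shiftRight_one]
  have hsq : GCong m (Gz (PySem.Int.mod (x * x - y * y) m) (PySem.Int.mod (2 * x * y) m))
      (Gz x y * Gz x y) := by
    have h := gmod_cong_self m (x * x - y * y) (2 * x * y)
    refine ⟨h.1.trans ?_, h.2.trans ?_⟩
    · rw [Gz_mul_re]; rw [show x * x + -1 * y * y = x * x - y * y by ring]; exact Int.ModEq.refl _
    · rw [Gz_mul_im]; rw [show x * y + y * x = 2 * x * y by ring]; exact Int.ModEq.refl _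
  have hans : GCong m
      (Gz (if PySem.Int.band (n : Int) 1 ≠ 0 then PySem.Int.mod (ansx * x - y * ansy) m else ansx)
          (if PySem.Int.band (n : Int) 1 ≠ 0 then PySem.Int.mod (ansx * y + x * ansy) m else ansy))
      (Gz ansx ansy * (Gz x y) ^ (n % 2)) := by
    by_cases hodd : PySem.Int.band (n : Int) 1 ≠ 0
    · have h2 : n % 2 = 1 := (pv_band_ne_iff n).mp hodd
      rw [if_pos hodd, if_pos hodd, h2, pow_one]
      have h := gmod_cong_self m (ansx * x - y * ansy) (ansx * y + x * ansy)
      refine ⟨h.1.trans ?_, h.2.trans ?_⟩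
      · rw [Gz_mul_re]; rw [show ansx * x + -1 * ansy * y = ansx * x - y * ansy by ring]; exact Int.ModEq.refl _
      · rw [Gz_mul_im]; rw [show ansx * y + ansy * x = ansx * y + x * ansy by ring]; exact Int.ModEq.refl _
    · have h2 : n % 2 = 0 := by
        have := (pv_band_ne_iff n).not.mp hodd; omega
      rw [if_neg hodd, if_neg hodd, h2, pow_zero, mul_one]
      exact GCong.rfl _
  have key : Gz ansx ansy * (Gz x y) ^ n
      = (Gz ansx ansy * (Gz x y) ^ (n % 2)) * ((Gz x y * Gz x y) ^ (n / 2)) := by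
    rw [← pow_two, ← pow_mul, mul_assoc, ← pow_add]
    congr 2
    omega
  by_cases hhalf : 0 < n / 2
  · rw [ih (n / 2) (by omega) hhalf]
    apply gmod_congr
    rw [key]
    exact hans.mul (hsq.pow (n / 2))
  · -- n = 1: the recursive call returns its accumulator unchanged
    have h1 : n = 1 := by omega
    subst h1
    rw [solveLoop, dif_neg (by norm_num)]
    have hodd : PySem.Int.band ((1 : Nat) : Int) 1 ≠ 0 := by decide
    rw [if_pos hodd, if_pos hodd]
    show _ = gmod m (Gz ansx ansy * Gz x y ^ 1)
    rw [pow_one]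
    simp only [gmod, Gz_mul_re, Gz_mul_im]
    rw [show ansx * x + -1 * ansy * y = ansx * x - y * ansy by ring,
        show ansx * y + ansy * x = ansx * y + x * ansy by ring]

-- characterisation of B: for k > 0 it computes base^k reduced componentwise mod m
theorem altB_char (a b m : Int) : ∀ n : Nat, 0 < n →
    solve_alt a b (n : Int) m = gmod m ((Gz a b) ^ n) := by
  intro n
  induction n using Nat.strong_induction_on with
  | _ n ih =>
  intro hn
  rw [solve_alt]
  rw [dif_neg (by omega)]
  rw [pvNatCast_shiftRight_one]
  set p := solve_alt a b ((n / 2 : Nat) : Int) m with hpdef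
  have hp : GCong m (Gz p.1 p.2) ((Gz a b) ^ (n / 2)) := by
    by_cases hhalf : 0 < n / 2
    · rw [hpdef, ih (n / 2) (by omega) hhalf]
      exact gmod_cong_self m _ _
    · have h0 : n / 2 = 0 := by omega
      rw [hpdef, h0]
      rw [solve_alt, dif_pos (by norm_num), pow_zero]
      exact GCong.rfl _
  have hraw : GCong m (Gz (p.1 * p.1 - p.2 * p.2) (2 * p.1 * p.2)) ((Gz a b) ^ (2 * (n / 2))) := by
    have hmul := hp.mul hp
    rw [← pow_add] at hmul
    rw [show n / 2 + n / 2 = 2 * (n / 2) by omega] at hmul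
    refine ⟨Int.ModEq.trans ?_ hmul.1, Int.ModEq.trans ?_ hmul.2⟩
    · rw [Gz_mul_re]
      rw [show p.1 * p.1 + -1 * p.2 * p.2 = p.1 * p.1 - p.2 * p.2 by ring]
      exact Int.ModEq.refl _
    · rw [Gz_mul_im]
      rw [show p.1 * p.2 + p.2 * p.1 = 2 * p.1 * p.2 by ring]
      exact Int.ModEq.refl _
  by_cases hodd : PySem.Int.band (n : Int) 1 ≠ 0
  · have h2 : n % 2 = 1 := (pv_band_ne_iff n).mp hodd
    rw [if_pos hodd]
    set ex := PySem.Int.mod (p.1 * p.1 - p.2 * p.2) m with hex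
    set ey := PySem.Int.mod (2 * p.1 * p.2) m with hey
    have hsq : GCong m (Gz ex ey) ((Gz a b) ^ (2 * (n / 2))) := by
      refine ⟨Int.ModEq.trans ?_ hraw.1, Int.ModEq.trans ?_ hraw.2⟩
      · exact pv_modeq_fmod_self m _
      · exact pv_modeq_fmod_self m _
    have hmul := hsq.mul (GCong.rfl (Gz a b))
    rw [← pow_succ] at hmul
    rw [show 2 * (n / 2) + 1 = n by omega] at hmul
    calc (PySem.Int.mod (ex * a - b * ey) m, PySem.Int.mod (ex * b + a * ey) m)
        = gmod m (Gz ex ey * Gz a b) := by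
          simp only [gmod, Gz_mul_re, Gz_mul_im]
          rw [show ex * a + -1 * ey * b = ex * a - b * ey by ring,
              show ex * b + ey * a = ex * b + a * ey by ring]
      _ = gmod m ((Gz a b) ^ n) := gmod_congr hmul
  · have h2 : n % 2 = 0 := by
      have := (pv_band_ne_iff n).not.mp hodd; omega
    rw [if_neg hodd]
    show gmod m (Gz (p.1 * p.1 - p.2 * p.2) (2 * p.1 * p.2)) = _
    rw [gmod_congr hraw]
    rw [show 2 * (n / 2) = n by omega]

-- ===== VERDICT (by name: the statement is the Claim_ definition above) =====
theorem solve_spec : Claim_equal_solve := by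
  unfold Claim_equal_solve
  intro a b k m _ _
  unfold Spec_solve
  by_cases hk : k ≤ 0
  · rw [solve, solveLoop, dif_neg (by omega), solve_alt, dif_pos hk]
  · have hk' : 0 < k := by omega
    obtain ⟨n, rfl⟩ : ∃ n : Nat, k = (n : Int) := ⟨k.toNat, (Int.toNat_of_nonneg hk'.le).symm⟩
    have hn : 0 < n := by exact_mod_cast hk'
    rw [solve, loopA_char m n hn, altB_char a b m n hn]
    congr 1
    rw [show Gz 1 0 = 1 from rfl, one_mul]
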